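-- pv_equiv track=rewrite | github.com/sanju-subash/Cloudnest-rag | app/rag_engine.py | _section_between
-- ===== SOURCE A (Python) =====
-- from typing import Dict, List, Tuple
--
-- def _find_line_index(lines: List[str], prefix: str) -> int:
--     target = prefix.lower()
--     for idx, line in enumerate(lines):
--         if line.lower().startswith(target):
--             return idx
--     return -1
--
-- def _section_between(lines: List[str], start_prefix: str, end_prefixes: Tuple[str, ...]) -> List[str]:
--     start_idx = _find_line_index(lines, start_prefix)
--     if start_idx == -1:
--         return []
--
--     end_idx = len(lines)
--     for idx in range(start_idx + 1, len(lines)):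
--         line_lower = lines[idx].lower()
--         if any(line_lower.startswith(end_prefix.lower()) for end_prefix in end_prefixes):
--             end_idx = idx
--             break
--     return lines[start_idx:end_idx]
-- ===== SOURCE B (Python) =====
-- def _section_between(lines, start_prefix, end_prefixes):
--     start = start_prefix.lower()
--     ends = tuple(e.lower() for e in end_prefixes)
--     result = []
--     collecting = False
--     for line in lines:
--         low = line.lower()
--         if collecting:
--             if any(low.startswith(e) for e in ends):
--                 break
--             result.append(line)
--         elif low.startswith(start):
--             collecting = True
--             result.append(line)
--     return result
-- ===== Notes on version B (the rewrite author's own statement) =====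
-- stated objective: simpler
-- what changed: Replaces the index-find helper plus range-scan plus slice with a single flag-driven pass that appends lines directly, lowercasing the end prefixes once up front.
import Mathlib
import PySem

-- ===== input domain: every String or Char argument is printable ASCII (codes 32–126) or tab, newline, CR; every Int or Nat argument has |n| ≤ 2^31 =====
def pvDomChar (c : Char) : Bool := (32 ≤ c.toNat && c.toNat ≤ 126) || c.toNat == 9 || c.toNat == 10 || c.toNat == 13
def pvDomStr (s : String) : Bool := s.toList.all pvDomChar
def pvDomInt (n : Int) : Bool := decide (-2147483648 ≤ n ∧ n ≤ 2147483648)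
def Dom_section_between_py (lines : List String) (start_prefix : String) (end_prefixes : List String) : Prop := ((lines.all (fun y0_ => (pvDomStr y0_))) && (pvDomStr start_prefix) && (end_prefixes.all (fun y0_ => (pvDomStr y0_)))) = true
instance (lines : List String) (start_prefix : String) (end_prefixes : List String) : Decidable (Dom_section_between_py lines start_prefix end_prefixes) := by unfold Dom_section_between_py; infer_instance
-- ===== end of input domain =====

-- B replaces A's index-find + range-scan + slice with a single flag-driven pass (simpler decomposition, same cost).

-- ===== PORT A =====
-- _find_line_index's enumerate loop (target precomputed as prefix.lower())
def findLineIndexGo (target : String) : List String → Int → Int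
  | [], _ => -1
  | l :: rest, idx =>
    if PySem.Str.startswith (PySem.Str.lower l) target then idx
    else findLineIndexGo target rest (idx + 1)

def findLineIndex (lines : List String) (pfx : String) : Int :=
  findLineIndexGo (PySem.Str.lower pfx) lines 0

-- `any(line_lower.startswith(end_prefix.lower()) for end_prefix in end_prefixes)`
def isEndLine (eps : List String) (line : String) : Bool :=
  eps.any (fun e => PySem.Str.startswith (PySem.Str.lower line) (PySem.Str.lower e))

-- the `for idx in range(start_idx+1, len(lines))` loop with break; lines[idx] is always
-- in range here, so pyGetD's default "" is never used (exact)
def endScanGo (lines : List String) (eps : List String) : List Int → Int → Int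
  | [], d => d
  | idx :: rest, d =>
    if isEndLine eps (PySem.List.pyGetD lines idx "") then idx
    else endScanGo lines eps rest d

def section_between_py (lines : List String) (start_prefix : String) (end_prefixes : List String) : List String :=
  let start_idx := findLineIndex lines start_prefix
  if start_idx = -1 then []
  else
    let end_idx := endScanGo lines end_prefixes
      (PySem.List.pyRange (start_idx + 1) (lines.length : Int) 1) (lines.length : Int)
    PySem.List.slice lines (some start_idx) (some end_idx)

-- ===== PORT B =====
def altGo (start : String) (ends : List String) : List String → Bool → List String
  | [], _ => []
  | l :: rest, true =>
    if ends.any (fun e => PySem.Str.startswith (PySem.Str.lower l) e) then []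
    else l :: altGo start ends rest true
  | l :: rest, false =>
    if PySem.Str.startswith (PySem.Str.lower l) start then
      l :: altGo start ends rest true
    else
      altGo start ends rest false

def section_between_py_alt (lines : List String) (start_prefix : String) (end_prefixes : List String) : List String :=
  altGo (PySem.Str.lower start_prefix) (end_prefixes.map (fun e => PySem.Str.lower e)) lines false

-- ===== PRECONDITION & SPEC =====
def Spec_section_between_py (lines : List String) (start_prefix : String) (end_prefixes : List String) (out : List String) : Prop := out = section_between_py_alt lines start_prefix end_prefixes
instance (lines : List String) (start_prefix : String) (end_prefixes : List String) (out : List String) : Decidable (Spec_section_between_py lines start_prefix end_prefixes out) := by unfold Spec_section_between_py; infer_instance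

-- ===== CLAIM (what is proved, stated in full; the proofs are below) =====
def Claim_equal_section_between_py : Prop := ∀ (lines : List String) (start_prefix : String) (end_prefixes : List String), Dom_section_between_py lines start_prefix end_prefixes → Spec_section_between_py lines start_prefix end_prefixes (section_between_py lines start_prefix end_prefixes)

-- ===== LEMMAS AND PROOFS =====

-- B's precomputed lowered end prefixes test the same condition as A's per-line any
lemma anyEnd_eq (eps : List String) (l : String) :
    (eps.map (fun e => PySem.Str.lower e)).any
      (fun e => PySem.Str.startswith (PySem.Str.lower l) e) = isEndLine eps l := by
  simp [isEndLine, List.any_map, Function.comp_def]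

lemma findGo_nonneg (t : String) (xs : List String) (i : Int) (hi : 0 ≤ i) :
    findLineIndexGo t xs i = -1 ∨ i ≤ findLineIndexGo t xs i := by
  induction xs generalizing i with
  | nil => left; rfl
  | cons l rest ih =>
    simp only [findLineIndexGo]
    split
    · right; exact le_refl i
    · rcases ih (i + 1) (by omega) with h | h
      · left; exact h
      · right; omega

lemma findGo_lt (t : String) (xs : List String) (i : Int) :
    findLineIndexGo t xs i = -1 ∨ findLineIndexGo t xs i < i + xs.length := by
  induction xs generalizing i with
  | nil => left; rfl
  | cons l rest ih =>
    simp only [findLineIndexGo]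
    split
    · right; simp only [List.length_cons]; push_cast; omega
    · rcases ih (i + 1) with h | h
      · left; exact h
      · right; simp only [List.length_cons] at *; push_cast at *; omega

lemma findGo_shift (t : String) (xs : List String) (i : Int) (hi : 0 ≤ i) :
    findLineIndexGo t xs i =
      if findLineIndexGo t xs 0 = -1 then -1 else findLineIndexGo t xs 0 + i := by
  induction xs generalizing i with
  | nil => simp [findLineIndexGo]
  | cons l rest ih =>
    simp only [findLineIndexGo]
    split
    · simp
    · rw [ih (i + 1) (by omega), ih (0 + 1) (by omega)]
      rcases findGo_nonneg t rest 0 le_rfl with h | h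
      · simp [h]
      · have hne : findLineIndexGo t rest 0 ≠ -1 := by omega
        simp only [if_neg hne]
        split <;> omega

lemma endScan_mem (lines eps : List String) (is : List Int) (d : Int) :
    endScanGo lines eps is d = d ∨ endScanGo lines eps is d ∈ is := by
  induction is with
  | nil => left; rfl
  | cons i is' ih =>
    simp only [endScanGo]
    split
    · right; exact List.mem_cons_self
    · rcases ih with h | h
      · left; exact h
      · right; exact List.mem_cons_of_mem _ h

lemma endScan_map_succ (l : String) (lines eps : List String) (is : List Int) (d : Int)
    (hnn : ∀ i ∈ is, 0 ≤ i) :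
    endScanGo (l :: lines) eps (is.map (fun i => i + 1)) (d + 1) =
      endScanGo lines eps is d + 1 := by
  induction is with
  | nil => rfl
  | cons i is' ih =>
    have hi : 0 ≤ i := hnn i List.mem_cons_self
    have hget : PySem.List.pyGetD (l :: lines) (i + 1) "" = PySem.List.pyGetD lines i "" := by
      have hcast : i = ((i.toNat : Nat) : Int) := by omega
      rw [hcast]
      have h1 : ((i.toNat : Nat) : Int) + 1 = (((i.toNat + 1 : Nat)) : Int) := by push_cast; ring
      rw [h1, PySem.List.pyGetD_natCast, PySem.List.pyGetD_natCast]
      rfl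
    simp only [List.map_cons, endScanGo, hget]
    split
    · rfl
    · exact ih (fun j hj => hnn j (List.mem_cons_of_mem _ hj))

lemma pyRange_succ_map (a b : Int) :
    PySem.List.pyRange (a + 1) (b + 1) 1 = (PySem.List.pyRange a b 1).map (fun i => i + 1) := by
  rw [PySem.List.pyRange_one, PySem.List.pyRange_one, List.map_map]
  have hlen : (b + 1 - (a + 1)).toNat = (b - a).toNat := by omega
  rw [hlen]
  apply List.map_congr_left
  intro k _
  simp only [Function.comp]
  omega

lemma mem_pyRange_nonneg (a b x : Int) (ha : 0 ≤ a) (hx : x ∈ PySem.List.pyRange a b 1) : 0 ≤ x := by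
  rw [PySem.List.mem_pyRange_one] at hx
  omega

-- the A-side end scan on `rest` (from index 0) combined with take is exactly B's collecting pass
lemma altGo_true_eq (start : String) (eps : List String) (rest : List String) :
    altGo start (eps.map (fun e => PySem.Str.lower e)) rest true =
      rest.take (endScanGo rest eps (PySem.List.pyRange 0 (rest.length : Int) 1) (rest.length : Int)).toNat := by
  induction rest with
  | nil => rfl
  | cons x xs ih =>
    have hcons : PySem.List.pyRange 0 ((x :: xs).length : Int) 1 =
        0 :: PySem.List.pyRange 1 ((x :: xs).length : Int) 1 := by
      apply PySem.List.pyRange_one_cons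
      simp
    rw [hcons]
    have hlen : ((x :: xs).length : Int) = (xs.length : Int) + 1 := by simp
    have hmap : PySem.List.pyRange 1 ((xs.length : Int) + 1) 1 =
        (PySem.List.pyRange 0 (xs.length : Int) 1).map (fun i => i + 1) := by
      have h := pyRange_succ_map 0 (xs.length : Int)
      norm_num at h
      exact h
    simp only [altGo, anyEnd_eq, endScanGo, PySem.List.pyGetD_zero_cons]
    by_cases hE : isEndLine eps x = true
    · simp [hE]
    · simp only [hE, Bool.false_eq_true, if_false]
      rw [hlen, hmap,
        endScan_map_succ x xs eps _ _ (fun i hi => mem_pyRange_nonneg 0 _ i le_rfl hi)]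
      have hnn : 0 ≤ endScanGo xs eps (PySem.List.pyRange 0 (xs.length : Int) 1) (xs.length : Int) := by
        rcases endScan_mem xs eps (PySem.List.pyRange 0 (xs.length : Int) 1) (xs.length : Int) with h | h
        · omega
        · exact mem_pyRange_nonneg 0 _ _ le_rfl h
      have htn : (endScanGo xs eps (PySem.List.pyRange 0 (xs.length : Int) 1) (xs.length : Int) + 1).toNat
          = (endScanGo xs eps (PySem.List.pyRange 0 (xs.length : Int) 1) (xs.length : Int)).toNat + 1 := by
        omega
      rw [htn, List.take_succ_cons, ih]

lemma slice_cons_succ (l : String) (xs : List String) (a b : Int) (ha : 0 ≤ a) (hb : 0 ≤ b) :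
    PySem.List.slice (l :: xs) (some (a + 1)) (some (b + 1)) = PySem.List.slice xs (some a) (some b) := by
  rw [PySem.List.slice_toNat _ (by omega) (by omega), PySem.List.slice_toNat _ ha hb]
  have h1 : (a + 1).toNat = a.toNat + 1 := by omega
  have h2 : (b + 1).toNat = b.toNat + 1 := by omega
  rw [h1, h2, List.drop_succ_cons]
  congr 1
  omega

lemma main_eq (start_prefix : String) (end_prefixes : List String) (lines : List String) :
    section_between_py lines start_prefix end_prefixes =
      section_between_py_alt lines start_prefix end_prefixes := by
  induction lines with
  | nil => rfl
  | cons l rest ih =>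
    simp only [section_between_py, section_between_py_alt, findLineIndex, findLineIndexGo, altGo] at *
    by_cases hm : PySem.Str.startswith (PySem.Str.lower l) (PySem.Str.lower start_prefix) = true
    · -- head matches the start prefix: start_idx = 0
      simp only [hm, if_true]
      have h0 : (0 : Int) ≠ -1 := by omega
      simp only [if_neg h0]
      have hlen : ((l :: rest).length : Int) = (rest.length : Int) + 1 := by simp
      have hmap : PySem.List.pyRange (0 + 1) ((rest.length : Int) + 1) 1 =
          (PySem.List.pyRange 0 (rest.length : Int) 1).map (fun i => i + 1) :=
        pyRange_succ_map 0 (rest.length : Int)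
      rw [hlen, hmap,
        endScan_map_succ l rest end_prefixes _ _ (fun i hi => mem_pyRange_nonneg 0 _ i le_rfl hi)]
      set e := endScanGo rest end_prefixes (PySem.List.pyRange 0 (rest.length : Int) 1) (rest.length : Int) with he
      have hnn : 0 ≤ e := by
        rcases endScan_mem rest end_prefixes (PySem.List.pyRange 0 (rest.length : Int) 1) (rest.length : Int) with h | h
        · omega
        · exact mem_pyRange_nonneg 0 _ _ le_rfl h
      rw [PySem.List.slice_toNat _ (by omega) (by omega)]
      have h2 : (e + 1).toNat - (0 : Int).toNat = e.toNat + 1 := by omega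
      rw [h2]
      simp only [Int.toNat_zero, List.drop_zero, List.take_succ_cons]
      rw [altGo_true_eq]
    · -- head does not match: both sides recurse on rest
      simp only [hm, Bool.false_eq_true, if_false]
      rw [← ih]
      rw [findGo_shift _ rest (0 + 1) (by omega)]
      simp only [zero_add]
      rcases findGo_nonneg (PySem.Str.lower start_prefix) rest 0 le_rfl with hneg | hpos
      · simp [hneg]
      · set r := findLineIndexGo (PySem.Str.lower start_prefix) rest 0 with hr
        have hrne : r ≠ -1 := by omega
        have hrlt : r < (rest.length : Int) := by
          rcases findGo_lt (PySem.Str.lower start_prefix) rest 0 with h | h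
          · omega
          · omega
        simp only [if_neg hrne]
        have hr1 : r + 1 ≠ -1 := by omega
        simp only [if_neg hr1]
        have hlen : ((l :: rest).length : Int) = (rest.length : Int) + 1 := by simp
        rw [hlen, pyRange_succ_map (r + 1) (rest.length : Int),
          endScan_map_succ l rest end_prefixes _ _ (fun i hi => mem_pyRange_nonneg (r + 1) _ i (by omega) hi)]
        set e := endScanGo rest end_prefixes (PySem.List.pyRange (r + 1) (rest.length : Int) 1) (rest.length : Int) with he
        have hnn : 0 ≤ e := by
          rcases endScan_mem rest end_prefixes (PySem.List.pyRange (r + 1) (rest.length : Int) 1) (rest.length : Int) with h | h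
          · omega
          · have := mem_pyRange_nonneg (r + 1) (rest.length : Int) e (by omega) h
            omega
        exact slice_cons_succ l rest r e hpos hnn

-- ===== VERDICT (by name: the statement is the Claim_ definition above) =====
theorem section_between_py_spec : Claim_equal_section_between_py := by
  intro lines sp eps _
  unfold Spec_section_between_py
  exact main_eq sp eps lines
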